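-- pv_equiv track=rewrite | github.com/face0ff/testovoe | testWithMod/valid.py | valid_name
-- ===== SOURCE A (Python) =====
-- def valid_name(names):
--     namesList = []
--     for i in (list(names.split(","))):
--         if i.isalpha() and len(i) <= 10:
--             namesList.append(i)
--         else:
--             namesList.clear()
--             return namesList
--
--     return namesList
-- ===== SOURCE B (Python) =====
-- def valid_name(names):
--     # single character scan: accept iff names matches (alpha{1,10})(,alpha{1,10})*
--     count = 0
--     for ch in names:
--         if ch == ',':
--             if count == 0:
--                 return []
--             count = 0
--         elif ch.isalpha():
--             count += 1
--             if count > 10: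
--                 return []
--         else:
--             return []
--     if count == 0:
--         return []
--     return names.split(',')
-- ===== Notes on version B (the rewrite author's own statement) =====
-- stated objective: alternative
-- what changed: B replaces A's split-then-validate-each-part loop with an accumulator by a single character-level scan (a run-length-counter DFA accepting (alpha{1,10})(,alpha{1,10})*) and splits the string only once, after it has been accepted.
import Mathlib
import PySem

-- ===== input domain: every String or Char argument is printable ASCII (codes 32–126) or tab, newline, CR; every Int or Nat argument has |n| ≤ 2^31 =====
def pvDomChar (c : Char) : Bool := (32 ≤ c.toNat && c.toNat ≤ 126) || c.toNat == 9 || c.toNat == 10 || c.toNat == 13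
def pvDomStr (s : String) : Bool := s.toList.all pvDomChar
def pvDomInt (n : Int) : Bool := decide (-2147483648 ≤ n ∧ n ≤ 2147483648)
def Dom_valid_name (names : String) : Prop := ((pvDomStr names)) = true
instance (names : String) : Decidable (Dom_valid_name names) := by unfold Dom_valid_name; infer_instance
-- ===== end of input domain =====

-- B replaces A's split-then-validate-each-part accumulator loop with a one-pass
-- character-level scan (a run-length counter DFA); it splits only once, at the end,
-- when the whole string has been accepted.

-- ===== PORT A =====
-- A's loop: append each valid part to the accumulator, early-return [] on failure
def validNameLoop (acc : List String) : List String → List String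
  | [] => acc
  | i :: rest =>
    if PySem.Str.strIsalpha i && decide (PySem.Str.len i ≤ 10) then
      validNameLoop (acc ++ [i]) rest
    else []

def valid_name (names : String) : List String :=
  validNameLoop [] ((PySem.Str.split? names ",").getD [])

-- ===== PORT B =====
-- B's scan: `count` is the length of the current comma-separated run of letters
def validScan : List Char → Nat → Bool
  | [], count => !(count == 0)
  | ch :: rest, count =>
    if ch == ',' then
      if count == 0 then false else validScan rest 0
    else if PySem.Chars.isalpha ch then
      if count + 1 > 10 then false else validScan rest (count + 1)
    else false

def valid_name_alt (names : String) : List String :=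
  if validScan names.toList 0 then (PySem.Str.split? names ",").getD [] else []

-- ===== PRECONDITION & SPEC =====
def Spec_valid_name (names : String) (out : List String) : Prop := out = valid_name_alt names
instance (names : String) (out : List String) : Decidable (Spec_valid_name names out) := by unfold Spec_valid_name; infer_instance

-- ===== CLAIM =====
def Claim_equal_valid_name : Prop := ∀ (names : String), Dom_valid_name names → Spec_valid_name names (valid_name names)

-- ===== LEMMAS AND PROOFS =====

-- the per-part predicate A checks
def okPart (p : List Char) : Bool :=
  PySem.Chars.strIsalpha p && decide (p.length ≤ 10)

-- per-part predicate for the FIRST part when `count` letters precede it in the run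
def okFirst (count : Nat) (p : List Char) : Bool :=
  p.all PySem.Chars.isalpha && decide (count + p.length ≤ 10) && !(count + p.length == 0)

theorem isEmpty_eq_len (p : List Char) : p.isEmpty = (p.length == 0) := by
  cases p <;> simp

theorem okFirst_zero (p : List Char) : okFirst 0 p = okPart p := by
  simp only [okFirst, okPart, PySem.Chars.strIsalpha, isEmpty_eq_len, Nat.zero_add,
    Bool.and_comm, Bool.and_left_comm, Bool.and_assoc]

-- a simple structural reference split on ','
def splitComma : List Char → List (List Char)
  | [] => [[]]
  | c :: rest =>
    if c = ',' then [] :: splitComma rest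
    else
      match splitComma rest with
      | p :: ps => (c :: p) :: ps
      | [] => [[c]]

theorem splitComma_ne_nil (l : List Char) : splitComma l ≠ [] := by
  cases l with
  | nil => simp [splitComma]
  | cons c rest =>
    simp only [splitComma]
    split_ifs
    · simp
    · cases h : splitComma rest <;> simp

-- PySem's splitOn.go with single-char separator "," computes splitComma
theorem splitOn_go_comma (fuel : Nat) (l cur : List Char) (acc : List (List Char))
    (hf : l.length ≤ fuel) :
    PySem.Chars.splitOn.go [','] fuel l cur acc =
      acc.reverse ++
        (match splitComma l with
         | p :: ps => (cur.reverse ++ p) :: ps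
         | [] => []) := by
  induction fuel generalizing l cur acc with
  | zero =>
    have : l = [] := List.length_eq_zero_iff.mp (Nat.le_zero.mp hf)
    subst this
    simp [PySem.Chars.splitOn.go, splitComma]
  | succ fuel ih =>
    cases l with
    | nil => simp [PySem.Chars.splitOn.go, splitComma]
    | cons c rest =>
      simp only [PySem.Chars.splitOn.go]
      by_cases hc : c = ','
      · subst hc
        rw [if_pos (by simp [List.isPrefixOf])]
        rw [show List.drop [','].length (',' :: rest) = rest from rfl]
        rw [ih rest [] (List.reverse cur :: acc) (by simpa using Nat.le_of_succ_le_succ hf)]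
        have hne := splitComma_ne_nil rest
        cases hsp : splitComma rest with
        | nil => exact absurd hsp hne
        | cons p ps =>
          simp only [splitComma, hsp]
          simp
      · rw [if_neg (by
          simp only [List.isPrefixOf_cons₂, List.isPrefixOf_nil_left, Bool.and_true]
          simpa using fun h => hc h.symm)]
        rw [ih rest (c :: cur) acc (by simpa using Nat.le_of_succ_le_succ hf)]
        have hne := splitComma_ne_nil rest
        cases hsp : splitComma rest with
        | nil => exact absurd hsp hne
        | cons p ps => simp [splitComma, hsp, hc]

theorem splitOn_comma (l : List Char) :
    PySem.Chars.splitOn l [','] = splitComma l := by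
  unfold PySem.Chars.splitOn
  rw [splitOn_go_comma (l.length + 1) l [] [] (Nat.le_succ _)]
  have hne := splitComma_ne_nil l
  cases hsp : splitComma l with
  | nil => exact absurd hsp hne
  | cons p ps => simp

-- B's DFA accepts exactly "every split part satisfies okPart" (first part offset by count)
theorem validScan_eq (l : List Char) (count : Nat) (hc : count ≤ 10) :
    validScan l count =
      (match splitComma l with
       | p :: ps => okFirst count p && ps.all okPart
       | [] => false) := by
  induction l generalizing count with
  | nil => simp [validScan, splitComma, okFirst, hc]
  | cons c rest ih =>
    by_cases hc' : c = ','
    · subst hc'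
      simp only [validScan, splitComma, if_pos (by rfl : (',' == ',') = true)]
      by_cases h0 : count = 0
      · simp [h0, okFirst]
      · rw [if_neg (by simpa using h0), ih 0 (by omega)]
        have hne := splitComma_ne_nil rest
        cases hsp : splitComma rest with
        | nil => exact absurd hsp hne
        | cons p ps =>
          have h0' : (count == 0) = false := by simpa using h0
          simp [okFirst, okPart, h0', PySem.Chars.strIsalpha, isEmpty_eq_len, hc,
            Bool.and_assoc, Bool.and_comm, Bool.and_left_comm]
    · have hbeq : (c == ',') = false := by simpa using hc'
      simp only [validScan, splitComma, if_neg hc', hbeq, Bool.false_eq_true, if_false]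
      have hne := splitComma_ne_nil rest
      cases hsp : splitComma rest with
      | nil => exact absurd hsp hne
      | cons p ps =>
        by_cases ha : PySem.Chars.isalpha c = true
        · rw [if_pos ha]
          by_cases hov : count + 1 > 10
          · rw [if_pos hov]
            simp only [okFirst, List.all_cons, ha, List.length_cons]
            have : ¬ (count + (p.length + 1) ≤ 10) := by omega
            simp [this]
          · rw [if_neg hov, ih (count + 1) (by omega)]
            simp only [okFirst, List.all_cons, ha, List.length_cons]
            have h1 : (count + (p.length + 1) ≤ 10) ↔ (count + 1 + p.length ≤ 10) := by omega
            have h2 : (count + (p.length + 1) == 0) = false := by simp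
            have h3 : (count + 1 + p.length == 0) = false := by simp
            simp [hsp, h1, h2, h3, Bool.and_assoc]
        · rw [if_neg ha]
          simp only [okFirst, List.all_cons]
          simp [ha]

-- A's loop equals the guarded identity on the whole list
theorem validNameLoop_eq (l acc : List String) :
    validNameLoop acc l =
      if l.all (fun n => PySem.Str.strIsalpha n && decide (PySem.Str.len n ≤ 10)) then
        acc ++ l
      else [] := by
  induction l generalizing acc with
  | nil => simp [validNameLoop]
  | cons i rest ih =>
    simp only [validNameLoop, List.all_cons]
    by_cases h : (PySem.Str.strIsalpha i && decide (PySem.Str.len i ≤ 10)) = true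
    · rw [if_pos h, ih]
      simp at h
      simp [h]
    · rw [if_neg h, if_neg (by simp_all)]

theorem okPart_ofList (p : List Char) :
    (PySem.Str.strIsalpha (String.ofList p) && decide (PySem.Str.len (String.ofList p) ≤ 10)) =
      okPart p := by
  simp [PySem.Str.strIsalpha, PySem.Str.len, okPart]

-- ===== VERDICT =====
theorem valid_name_spec : Claim_equal_valid_name := by
  intro names _
  unfold Spec_valid_name valid_name valid_name_alt
  rw [validNameLoop_eq]
  have hsplit : (PySem.Str.split? names ",").getD [] =
      (splitComma names.toList).map String.ofList := by
    simp [PySem.Str.split?, PySem.Chars.split?, splitOn_comma]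
  rw [hsplit, validScan_eq names.toList 0 (by omega)]
  have hne := splitComma_ne_nil names.toList
  cases hsp : splitComma names.toList with
  | nil => exact absurd hsp hne
  | cons p ps =>
    have hall : ∀ q : List Char,
        (PySem.Str.strIsalpha (String.ofList q) && decide (PySem.Str.len (String.ofList q) ≤ 10)) =
          okPart q := okPart_ofList
    simp only [List.map_cons, List.all_cons, List.all_map, Function.comp_def, hall,
      okFirst_zero]
    simp
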